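-- pv_equiv track=rewrite | github.com/NTIG-Uppsala/Cafeteria-skylt | PyTests/tests.py | ConvertToCleanList
-- ===== SOURCE A (Python) =====
-- def ConvertToCleanList(string):
--     #Removes specified characters from the called string.
--     disallowedCharacters = '["] \n}'
--     for character in string:
--         for symbol in disallowedCharacters:
--             if character == symbol:
--                 string = string.replace(character, "")
--     li = list(string.split(","))
--
--     return li
-- ===== SOURCE B (Python) =====
-- def ConvertToCleanList(string):
--     # Split first, then clean each token (commas are never disallowed, so order is safe).
--     disallowedCharacters = '["] \n}'
--     return ["".join(c for c in token if c not in disallowedCharacters)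
--             for token in string.split(",")]
-- ===== Notes on version B (the rewrite author's own statement) =====
-- stated objective: faster
-- what changed: A scans the whole string character by character, calling str.replace on the accumulated string for each disallowed character it meets, and only then splits on the comma; B splits on the comma first and then cleans each token in one per-token filter pass, which is valid because the comma is never a disallowed character.
import Mathlib
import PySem

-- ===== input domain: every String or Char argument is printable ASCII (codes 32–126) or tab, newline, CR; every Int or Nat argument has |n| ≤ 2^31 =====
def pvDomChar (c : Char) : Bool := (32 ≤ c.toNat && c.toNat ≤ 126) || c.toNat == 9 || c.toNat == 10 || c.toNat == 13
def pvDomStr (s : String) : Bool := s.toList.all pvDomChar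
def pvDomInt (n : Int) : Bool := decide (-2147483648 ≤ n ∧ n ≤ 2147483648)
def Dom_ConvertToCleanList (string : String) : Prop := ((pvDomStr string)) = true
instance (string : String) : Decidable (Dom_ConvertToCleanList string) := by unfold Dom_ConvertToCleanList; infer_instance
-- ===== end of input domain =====

-- B inverts A's order — split on ',' first, then filter the disallowed characters out of each
-- token — a per-token cleaning pass instead of repeated whole-string replace() calls (objective: faster; measured).

-- ===== PORT A =====
-- A: for each character of the (original) string, scan the disallowed alphabet and, on a match,
-- replace all its occurrences in the accumulated string; finally split on ','.
def pvDisallowed : String := "[\"] \n}"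

def ConvertToCleanList (string : String) : List String :=
  let cleaned := string.toList.foldl
    (fun s character =>
      pvDisallowed.toList.foldl
        (fun s symbol =>
          if character = symbol then PySem.Str.replace s (String.ofList [character]) "" else s) s)
    string
  (PySem.Str.split? cleaned ",").getD []

-- ===== PORT B =====
def ConvertToCleanList_alt (string : String) : List String :=
  ((PySem.Str.split? string ",").getD []).map
    (fun token => String.ofList (token.toList.filter (fun c => !(pvDisallowed.toList.contains c))))

-- ===== PRECONDITION & SPEC =====
def Spec_ConvertToCleanList (string : String) (out : List String) : Prop := out = ConvertToCleanList_alt string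
instance (string : String) (out : List String) : Decidable (Spec_ConvertToCleanList string out) := by unfold Spec_ConvertToCleanList; infer_instance

-- ===== CLAIM (what is proved, stated in full; the proofs are below) =====
def Claim_equal_ConvertToCleanList : Prop := ∀ (string : String), Dom_ConvertToCleanList string → Spec_ConvertToCleanList string (ConvertToCleanList string)

-- ===== LEMMAS AND PROOFS =====

-- The inner scan over a duplicate-free alphabet fires at most once: it is one conditional replace.
theorem foldl_replace_not_mem (c : Char) (L : List Char) (h : c ∉ L) (s : String) :
    L.foldl (fun s symbol =>
      if c = symbol then PySem.Str.replace s (String.ofList [c]) "" else s) s = s := by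
  induction L generalizing s with
  | nil => rfl
  | cons x t ih =>
      simp only [List.mem_cons, not_or] at h
      simp only [List.foldl_cons, if_neg h.1]
      exact ih h.2 s

theorem foldl_replace_eq_ite (c : Char) (L : List Char) (hnd : L.Nodup) (s : String) :
    L.foldl (fun s symbol =>
      if c = symbol then PySem.Str.replace s (String.ofList [c]) "" else s) s =
    if c ∈ L then PySem.Str.replace s (String.ofList [c]) "" else s := by
  induction L generalizing s with
  | nil => rfl
  | cons x t ih =>
      rcases List.nodup_cons.mp hnd with ⟨hx, hnt⟩
      by_cases hc : c = x
      · subst hc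
        simp only [List.foldl_cons, List.mem_cons, true_or, if_pos]
        exact foldl_replace_not_mem c t hx _
      · simp only [List.foldl_cons, if_neg hc, ih hnt, List.mem_cons]
        simp [hc]

-- replace by one character with "" is a filter
theorem replace_go_single (c : Char) (l : List Char) (fuel : Nat) (acc : List Char)
    (h : l.length ≤ fuel) :
    PySem.Chars.replace.go [c] [] fuel l acc = acc.reverse ++ l.filter (fun x => x ≠ c) := by
  induction l generalizing fuel acc with
  | nil => cases fuel <;> simp [PySem.Chars.replace.go]
  | cons x t ih =>
      cases fuel with
      | zero => simp at h
      | succ f =>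
          simp only [List.length_cons, Nat.succ_le_succ_iff] at h
          by_cases hx : c = x
          · subst hx
            simp only [PySem.Chars.replace.go, List.isPrefixOf, BEq.rfl, Bool.and_eq_true,
              and_true, if_true]
            simp only [List.length_cons, List.length_nil, List.drop_succ_cons, List.drop_zero,
              List.reverse_nil, List.nil_append]
            rw [ih f acc h]
            simp
          · simp only [PySem.Chars.replace.go, List.isPrefixOf]
            have : (c == x) = false := by simp [hx]
            simp only [this, Bool.false_and, Bool.false_eq_true, if_false]
            rw [ih f (x :: acc) h]
            simp [Ne.symm hx]

theorem replace_single_eq_filter (cs : List Char) (c : Char) :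
    PySem.Chars.replace cs [c] [] = cs.filter (fun x => x ≠ c) := by
  unfold PySem.Chars.replace
  simp only [List.isEmpty_cons, Bool.false_eq_true, if_false]
  exact replace_go_single c cs cs.length [] le_rfl

-- the outer character loop, seen on .toList, becomes a fold of conditional filters
theorem toList_outer_foldl (cs : List Char) (s : String) :
    (cs.foldl
      (fun s character =>
        pvDisallowed.toList.foldl
          (fun s symbol =>
            if character = symbol then PySem.Str.replace s (String.ofList [character]) "" else s) s)
      s).toList =
    cs.foldl
      (fun l c => if c ∈ pvDisallowed.toList then l.filter (fun x => x ≠ c) else l)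
      s.toList := by
  induction cs generalizing s with
  | nil => rfl
  | cons c t ih =>
      simp only [List.foldl_cons]
      rw [ih, foldl_replace_eq_ite c _ (by decide) s]
      by_cases hc : c ∈ pvDisallowed.toList
      · rw [if_pos hc, if_pos hc]
        congr 1
        rw [PySem.Str.toList_replace]
        simpa using replace_single_eq_filter s.toList c
      · rw [if_neg hc, if_neg hc]

-- the fold of conditional filters is one filter
theorem foldl_cond_filter (D : List Char) (cs : List Char) (l0 : List Char) :
    cs.foldl (fun l c => if c ∈ D then l.filter (fun x => x ≠ c) else l) l0 =
    l0.filter (fun x => !(D.contains x && cs.contains x)) := by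
  induction cs generalizing l0 with
  | nil => simp
  | cons c t ih =>
      simp only [List.foldl_cons]
      by_cases hc : c ∈ D
      · rw [if_pos hc, ih, List.filter_filter]
        apply List.filter_congr
        intro x _
        by_cases hx : x = c
        · subst hx; simp [hc]
        · simp [hx]
      · rw [if_neg hc, ih]
        apply List.filter_congr
        intro x _
        by_cases hx : x = c
        · rw [hx]; simp [hc]
        · simp [hx]

theorem cleaned_eq_filter (s : String) :
    (s.toList.foldl
      (fun s character =>
        pvDisallowed.toList.foldl
          (fun s symbol =>
            if character = symbol then PySem.Str.replace s (String.ofList [character]) "" else s) s)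
      s).toList = s.toList.filter (fun x => !(pvDisallowed.toList.contains x)) := by
  rw [toList_outer_foldl, foldl_cond_filter]
  apply List.filter_congr
  intro x hx
  simp [hx]

-- split-on-one-character, recursively
def splitF (a : Char) : List Char → List (List Char)
  | [] => [[]]
  | c :: t => if c = a then [] :: splitF a t else (splitF a t).modifyHead (c :: ·)

theorem splitF_ne_nil (a : Char) (l : List Char) : splitF a l ≠ [] := by
  cases l with
  | nil => simp [splitF]
  | cons c t =>
      simp only [splitF]
      split
      · simp
      · cases h : splitF a t with
        | nil => exact absurd h (splitF_ne_nil a t)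
        | cons x xs => simp [List.modifyHead]

theorem splitOn_go_spec (a : Char) (l : List Char) (fuel : Nat) (cur : List Char)
    (acc : List (List Char)) (h : l.length ≤ fuel) :
    PySem.Chars.splitOn.go [a] fuel l cur acc =
      acc.reverse ++ (splitF a l).modifyHead (cur.reverse ++ ·) := by
  induction l generalizing fuel cur acc with
  | nil => cases fuel <;> simp [PySem.Chars.splitOn.go, splitF, List.modifyHead]
  | cons c t ih =>
      cases fuel with
      | zero => simp at h
      | succ f =>
          simp only [List.length_cons, Nat.succ_le_succ_iff] at h
          by_cases hc : a = c
          · subst hc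
            simp only [PySem.Chars.splitOn.go, List.isPrefixOf, BEq.rfl,
              Bool.and_eq_true, and_true, if_true]
            simp only [List.length_cons, List.length_nil, List.drop_succ_cons, List.drop_zero]
            rw [ih f [] (cur.reverse :: acc) h]
            cases hs : splitF a t with
            | nil => exact absurd hs (splitF_ne_nil a t)
            | cons x xs => simp [splitF, List.modifyHead, hs]
          · simp only [PySem.Chars.splitOn.go, List.isPrefixOf]
            have : (a == c) = false := by simp [hc]
            simp only [this, Bool.false_and, Bool.false_eq_true, if_false]
            rw [ih f (c :: cur) acc h]
            cases hs : splitF a t with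
            | nil => exact absurd hs (splitF_ne_nil a t)
            | cons x xs => simp [splitF, Ne.symm hc, List.modifyHead, hs]

theorem splitOn_single (a : Char) (cs : List Char) :
    PySem.Chars.splitOn cs [a] = splitF a cs := by
  unfold PySem.Chars.splitOn
  rw [splitOn_go_spec a cs (cs.length + 1) [] [] (by omega)]
  cases hs : splitF a cs with
  | nil => exact absurd hs (splitF_ne_nil a cs)
  | cons x xs => simp [List.modifyHead]

-- filtering commutes with splitting when the separator is never filtered out
theorem splitF_filter (a : Char) (p : Char → Bool) (hp : p a = true) (cs : List Char) :
    splitF a (cs.filter p) = (splitF a cs).map (List.filter p) := by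
  induction cs with
  | nil => simp [splitF]
  | cons c t ih =>
      by_cases hc : c = a
      · rw [List.filter_cons_of_pos (by simp [hc, hp])]
        rw [show splitF a (c :: List.filter p t) = [] :: splitF a (List.filter p t) from by
          simp [splitF, hc]]
        rw [ih]
        simp [splitF, hc]
      · simp only [splitF, if_neg hc]
        cases hpc : p c with
        | true =>
            simp only [List.filter_cons, hpc, if_pos, splitF, if_neg hc, ih]
            cases hs : splitF a t with
            | nil => exact absurd hs (splitF_ne_nil a t)
            | cons x xs => simp [List.modifyHead, hpc]
        | false =>
            rw [List.filter_cons_of_neg (by simp [hpc])]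
            rw [ih]
            cases hs : splitF a t with
            | nil => exact absurd hs (splitF_ne_nil a t)
            | cons x xs => simp [List.modifyHead, hpc]

theorem split_getD_eq (t : String) :
    (PySem.Str.split? t ",").getD [] = (splitF ',' t.toList).map String.ofList := by
  simp [PySem.Str.split?, PySem.Chars.split?, show ",".toList = [','] from rfl,
    splitOn_single]

-- ===== VERDICT (by name: the statement is the Claim_ definition above) =====
theorem ConvertToCleanList_spec : Claim_equal_ConvertToCleanList := by
  unfold Claim_equal_ConvertToCleanList
  intro s _
  unfold Spec_ConvertToCleanList ConvertToCleanList ConvertToCleanList_alt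
  rw [split_getD_eq, split_getD_eq]
  have hp : (fun c => !(pvDisallowed.toList.contains c)) ',' = true := by decide
  have hcomm := splitF_filter ',' (fun c => !(pvDisallowed.toList.contains c)) hp s.toList
  rw [← cleaned_eq_filter s] at hcomm
  rw [hcomm, List.map_map, List.map_map]
  simp
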